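-- pv_equiv track=rewrite | github.com/manwaner333/Learning-Flux-Diffusion-Functions-Convection-Diffusion-Equations | beta_5_without_diff_obs3/analysis.py | missing_values
-- ===== SOURCE A (Python) =====
-- def missing_values(lst):
--     result = []
--     sub = []
--     for i in range(len(lst) - 1):
--         sub.append(lst[i])
--         if lst[i+1] - lst[i] > 1:
--             if len(sub) >= 2:
--                 result.append(sub)
--             sub = []
--     if len(sub) > 1:
--         result.append(sub)
--     return result
-- ===== SOURCE B (Python) =====
-- def missing_values(lst):
--     # Scan the body lst[:-1] back-to-front, building each run right-to-left and
--     # closing it when the gap to the previous element exceeds 1.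
--     out = []
--     run = []  # current run, collected right-to-left; run[-1] is its leftmost element
--     for x in reversed(lst[:-1]):
--         if run and run[-1] - x <= 1:
--             run.append(x)
--         else:
--             if len(run) >= 2:
--                 out.append(list(reversed(run)))
--             run = [x]
--     if len(run) >= 2:
--         out.append(list(reversed(run)))
--     out.reverse()
--     return out
-- ===== Notes on version B (the rewrite author's own statement) =====
-- stated objective: alternative
-- what changed: B drops the unused last element up front and scans the body in reverse, building each run right-to-left and closing it when the backward gap exceeds 1, instead of A's forward index loop that peeks at lst[i+1] to flush an accumulator.
import Mathlib
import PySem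

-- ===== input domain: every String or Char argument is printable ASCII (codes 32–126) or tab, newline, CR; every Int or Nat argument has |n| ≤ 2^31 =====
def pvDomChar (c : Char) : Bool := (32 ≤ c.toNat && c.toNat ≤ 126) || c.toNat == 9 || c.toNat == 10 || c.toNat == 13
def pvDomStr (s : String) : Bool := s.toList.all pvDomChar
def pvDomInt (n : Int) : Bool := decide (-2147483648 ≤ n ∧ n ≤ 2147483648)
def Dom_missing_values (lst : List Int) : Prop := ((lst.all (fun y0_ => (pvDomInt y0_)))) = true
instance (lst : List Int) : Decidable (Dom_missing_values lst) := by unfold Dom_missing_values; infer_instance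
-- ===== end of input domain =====

-- B replaces A's forward index loop (which peeks at lst[i+1]) by a reverse scan of lst[:-1]
-- that builds each run right-to-left; return values agree, as proved below.

-- ===== PORT A =====
-- loop body of A's 'for i in range(len(lst) - 1)': state = (result, sub)
def mvStepA (lst : List Int) (st : List (List Int) × List Int) (i : Int) :
    List (List Int) × List Int :=
  let sub := st.2 ++ [PySem.List.pyGetD lst i 0]
  if 1 < PySem.List.pyGetD lst (i + 1) 0 - PySem.List.pyGetD lst i 0 then
    (if 2 ≤ sub.length then st.1 ++ [sub] else st.1, [])
  else (st.1, sub)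

def missing_values (lst : List Int) : List (List Int) :=
  let st := (PySem.List.pyRange 0 (PySem.List.len lst - 1)).foldl (mvStepA lst) ([], [])
  if 1 < st.2.length then st.1 ++ [st.2] else st.1

-- ===== PORT B =====
-- 'if len(run) >= 2: out.append(list(reversed(run)))'
def mvClose (out : List (List Int)) (run : List Int) : List (List Int) :=
  if 2 ≤ run.length then out ++ [run.reverse] else out

-- loop body of B's 'for x in reversed(lst[:-1])': state = (out, run); run[-1] is run.getLast?
def mvStepB (st : List (List Int) × List Int) (x : Int) : List (List Int) × List Int :=
  match st.2.getLast? with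
  | some r => if r - x ≤ 1 then (st.1, st.2 ++ [x]) else (mvClose st.1 st.2, [x])
  | none => (mvClose st.1 st.2, [x])

def missing_values_alt (lst : List Int) : List (List Int) :=
  let body := PySem.List.slice lst none (some (-1))  -- lst[:-1]
  let st := body.reverse.foldl mvStepB ([], [])
  (mvClose st.1 st.2).reverse


-- ===== PRECONDITION & SPEC =====
def Spec_missing_values (lst : List Int) (out : List (List Int)) : Prop := out = missing_values_alt lst
instance (lst : List Int) (out : List (List Int)) : Decidable (Spec_missing_values lst out) := by unfold Spec_missing_values; infer_instance

-- ===== CLAIM (what is proved, stated in full; the proofs are below) =====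
def Claim_equal_missing_values : Prop := ∀ (lst : List Int), Dom_missing_values lst → Spec_missing_values lst (missing_values lst)

-- ===== LEMMAS AND PROOFS =====
-- reference semantics: maximal runs (adjacent gap ≤ 1) of the body, kept if length ≥ 2
def mvRuns : List Int → List (List Int)
  | [] => []
  | x :: xs =>
    match mvRuns xs with
    | [] => [[x]]
    | [] :: gs => [x] :: gs
    | (y :: g) :: gs => if y - x ≤ 1 then (x :: y :: g) :: gs else [x] :: (y :: g) :: gs

def mvKeep (gs : List (List Int)) : List (List Int) := gs.filter (fun g => decide (2 ≤ g.length))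

def mvConsFirst (sub : List Int) : List (List Int) → List (List Int)
  | [] => [sub]
  | g :: gs => (sub ++ g) :: gs

def mvStepP (st : List (List Int) × List Int) (p : Int × Int) : List (List Int) × List Int :=
  let sub := st.2 ++ [p.1]
  if 1 < p.2 - p.1 then (if 2 ≤ sub.length then st.1 ++ [sub] else st.1, []) else (st.1, sub)

def mvFin (st : List (List Int) × List Int) : List (List Int) :=
  if 2 ≤ st.2.length then st.1 ++ [st.2] else st.1

lemma mvRuns_cons (y : Int) (b : List Int) :
    ∃ g gs, mvRuns (y :: b) = (y :: g) :: gs := by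
  simp only [mvRuns]
  rcases h : mvRuns b with _ | ⟨_ | ⟨z, g⟩, gs⟩ <;> dsimp only
  · exact ⟨[], [], rfl⟩
  · exact ⟨[], gs, rfl⟩
  · split
    · exact ⟨z :: g, gs, rfl⟩
    · exact ⟨[], _, rfl⟩

lemma mvRuns_cons_eq (x y : Int) (b : List Int) (g : List Int) (gs : List (List Int))
    (h : mvRuns (y :: b) = (y :: g) :: gs) :
    mvRuns (x :: y :: b) = if y - x ≤ 1 then (x :: y :: g) :: gs else [x] :: (y :: g) :: gs := by
  conv_lhs => rw [mvRuns]
  rw [h]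

lemma mvRuns_nil_iff (b : List Int) : mvRuns b = [] ↔ b = [] := by
  cases b with
  | nil => simp [mvRuns]
  | cons x xs =>
    simp only [mvRuns]
    rcases h : mvRuns xs with _ | ⟨_ | ⟨z, g⟩, gs⟩ <;> dsimp only <;> simp
    split <;> simp

lemma mvKeep_nil : mvKeep [] = [] := rfl

lemma mvKeep_cons (g : List Int) (gs : List (List Int)) :
    mvKeep (g :: gs) = if 2 ≤ g.length then g :: mvKeep gs else mvKeep gs := by
  simp [mvKeep, List.filter_cons]

lemma mv_foldB_char : ∀ (b : List Int) (g : List Int) (gs : List (List Int)),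
    mvRuns b = g :: gs →
    b.foldr (fun x st => mvStepB st x) ([], []) = ((mvKeep gs).reverse, g.reverse) := by
  intro b
  induction b with
  | nil => intro g gs h; simp [mvRuns] at h
  | cons x c ih =>
    intro g gs h
    cases c with
    | nil =>
      have : mvRuns [x] = [[x]] := rfl
      rw [this] at h
      injection h with h1 h2
      subst h1; subst h2
      simp [mvStepB, mvClose, mvKeep_nil]
    | cons y cc =>
      obtain ⟨g', gs', hg⟩ := mvRuns_cons y cc
      rw [mvRuns_cons_eq x y cc g' gs' hg] at h
      rw [List.foldr_cons, ih _ _ hg]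
      by_cases hle : y - x ≤ 1
      · rw [if_pos hle] at h
        injection h with h1 h2
        subst h1; subst h2
        simp only [mvStepB, List.getLast?_reverse, List.head?_cons]
        rw [if_pos hle]
        simp
      · rw [if_neg hle] at h
        injection h with h1 h2
        subst h1; subst h2
        simp only [mvStepB, List.getLast?_reverse, List.head?_cons]
        rw [if_neg hle]
        simp only [mvClose, List.length_reverse, List.reverse_reverse, List.length_cons,
          mvKeep_cons]
        split_ifs <;> simp

lemma mv_idx_pairs (lst : List Int) :
    (PySem.List.pyRange 0 (PySem.List.len lst - 1)).map
      (fun i => (PySem.List.pyGetD lst i 0, PySem.List.pyGetD lst (i + 1) 0)) =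
      lst.zip (lst.drop 1) := by
  cases lst with
  | nil => decide
  | cons x t =>
    have hlen : PySem.List.len (x :: t) - 1 = ((t.length : Nat) : Int) := by
      simp [PySem.List.len]
    rw [hlen, PySem.List.pyRange_zero_natCast, List.map_map]
    apply List.ext_getElem
    · simp
    · intro i h1 h2
      simp only [List.getElem_map, List.getElem_range, Function.comp_apply]
      have hi1 : (i : Int) + 1 = ((i + 1 : Nat) : Int) := by push_cast; ring
      rw [hi1, PySem.List.pyGetD_natCast, PySem.List.pyGetD_natCast]
      have hit : i < t.length := by simpa using h1
      have e1 : (x :: t).getD i 0 = (x :: t)[i]'(by simp; omega) :=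
        List.getD_eq_getElem _ _ (by simp; omega)
      have e2 : (x :: t).getD (i+1) 0 = (x :: t)[i+1]'(by simp; omega) :=
        List.getD_eq_getElem _ _ (by simp; omega)
      rw [e1, e2]
      simp [List.getElem_zip]

lemma mv_foldA_char (lst : List Int) : ∀ (res : List (List Int)) (sub : List Int),
    mvFin ((lst.zip (lst.drop 1)).foldl mvStepP (res, sub)) =
      res ++ mvKeep (mvConsFirst sub (mvRuns lst.dropLast)) := by
  induction lst with
  | nil =>
    intro res sub
    simp only [List.zip_nil_left, List.foldl_nil, mvFin, List.dropLast_nil, mvRuns, mvConsFirst,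
      mvKeep_cons, mvKeep_nil]
    split_ifs <;> simp
  | cons x t ih =>
    intro res sub
    cases t with
    | nil =>
      simp only [List.drop_succ_cons, List.drop_nil, List.zip_nil_right, List.foldl_nil, mvFin]
      have : (List.dropLast [x]) = ([] : List Int) := rfl
      rw [this]
      simp only [mvRuns, mvConsFirst, mvKeep_cons, mvKeep_nil]
      split_ifs <;> simp
    | cons y t' =>
      have hzip : (x :: y :: t').zip ((x :: y :: t').drop 1) =
          (x, y) :: ((y :: t').zip ((y :: t').drop 1)) := by simp
      rw [hzip, List.foldl_cons]
      have hd2 : (x :: y :: t').dropLast = x :: (y :: t').dropLast := rfl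
      rw [hd2]
      by_cases hgap : 1 < y - x
      · have hstep : mvStepP (res, sub) (x, y) =
            (if 2 ≤ (sub ++ [x]).length then res ++ [sub ++ [x]] else res, []) := by
          simp [mvStepP, hgap]
        rw [hstep, ih]
        cases t' with
        | nil =>
          have h1 : (List.dropLast [y]) = ([] : List Int) := rfl
          rw [h1]
          simp only [mvRuns, mvConsFirst]
          have hk : mvKeep [([] : List Int)] = [] := rfl
          rw [hk, mvKeep_cons, mvKeep_nil]
          split_ifs <;> simp
        | cons z tz =>
          have hd : (y :: z :: tz).dropLast = y :: (z :: tz).dropLast := rfl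
          rw [hd]
          obtain ⟨g, gs, hg⟩ := mvRuns_cons y (z :: tz).dropLast
          rw [mvRuns_cons_eq x y _ g gs hg, if_neg (show ¬(y - x ≤ 1) by omega), hg]
          simp only [mvConsFirst, mvKeep_cons, List.nil_append]
          split_ifs <;> simp
      · have hstep : mvStepP (res, sub) (x, y) = (res, sub ++ [x]) := by
          simp [mvStepP, hgap]
        rw [hstep, ih]
        cases t' with
        | nil =>
          have h1 : (List.dropLast [y]) = ([] : List Int) := rfl
          rw [h1]
          simp [mvRuns, mvConsFirst]
        | cons z tz =>
          have hd : (y :: z :: tz).dropLast = y :: (z :: tz).dropLast := rfl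
          rw [hd]
          obtain ⟨g, gs, hg⟩ := mvRuns_cons y (z :: tz).dropLast
          rw [mvRuns_cons_eq x y _ g gs hg, if_pos (show y - x ≤ 1 by omega), hg]
          simp [mvConsFirst]

lemma mv_A_char (lst : List Int) : missing_values lst = mvKeep (mvRuns lst.dropLast) := by
  have e : (PySem.List.pyRange 0 (PySem.List.len lst - 1)).foldl (mvStepA lst) ([], []) =
      (lst.zip (lst.drop 1)).foldl mvStepP ([], []) := by
    rw [← mv_idx_pairs lst, List.foldl_map]
    rfl
  show mvFin ((PySem.List.pyRange 0 (PySem.List.len lst - 1)).foldl (mvStepA lst) ([], [])) =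
    mvKeep (mvRuns lst.dropLast)
  rw [e, mv_foldA_char lst [] []]
  cases h : mvRuns lst.dropLast with
  | nil => rfl
  | cons g gs => simp [mvConsFirst]

lemma mv_B_char (lst : List Int) : missing_values_alt lst = mvKeep (mvRuns lst.dropLast) := by
  show (let st := (PySem.List.slice lst none (some (-1))).reverse.foldl mvStepB ([], [])
        (mvClose st.1 st.2).reverse) = mvKeep (mvRuns lst.dropLast)
  rw [PySem.List.slice_to_neg_one, List.foldl_reverse]
  cases h : mvRuns lst.dropLast with
  | nil =>
    rw [(mvRuns_nil_iff _).mp h]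
    rfl
  | cons g gs =>
    rw [mv_foldB_char lst.dropLast g gs h]
    simp only [mvClose, List.length_reverse, List.reverse_reverse, mvKeep_cons]
    split_ifs <;> simp

-- ===== VERDICT (by name: the statement is the Claim_ definition above) =====
theorem missing_values_spec : Claim_equal_missing_values := by
  intro lst _
  unfold Spec_missing_values
  rw [mv_A_char, mv_B_char]
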